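-- pv_equiv track=rewrite | github.com/Synthesis-Automation/Reaction-Predictor | scripts/grading/make_panel.py | _family_of
-- ===== SOURCE A (Python) =====
-- from typing import List, Dict
--
-- def _family_of(row: Dict) -> str:
--     rt = (row.get('ReactionType') or '').strip()
--     if not rt:
--         return 'Other'
--     low = rt.lower()
--     if 'ullmann' in low:
--         return 'Ullmann'
--     if 'amide' in low or 'amidation' in low:
--         return 'Amide Formation'
--     if any(x in low for x in ['buchwald', 'suzuki', 'heck', 'sonogashira', 'stille', 'negishi', 'chan-lam', 'cross-coupling']):
--         return 'Cross-Coupling'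
--     return 'Other'
-- ===== SOURCE B (Python) =====
-- from typing import List, Dict
--
-- # (keyword, priority) pairs; priority = index into _FAMILIES
-- _KEYWORDS = [('ullmann', 0), ('amide', 1), ('amidation', 1),
--              ('buchwald', 2), ('suzuki', 2), ('heck', 2), ('sonogashira', 2),
--              ('stille', 2), ('negishi', 2), ('chan-lam', 2), ('cross-coupling', 2)]
-- _FAMILIES = ['Ullmann', 'Amide Formation', 'Cross-Coupling', 'Other']
--
-- def _family_of(row: Dict) -> str:
--     rt = (row.get('ReactionType') or '').strip()
--     if not rt:
--         return 'Other'
--     low = rt.lower()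
--     best = 3
--     for i in range(len(low)):
--         for kw, pri in _KEYWORDS:
--             if pri < best and low.startswith(kw, i):
--                 best = pri
--     return _FAMILIES[best]
-- ===== Notes on version B (the rewrite author's own statement) =====
-- stated objective: alternative
-- what changed: Replaces the ordered substring-cascade (one scan per keyword, early return per rule) with a single left-to-right position scan of the lowered string that keeps a minimum-priority accumulator over a flat (keyword, priority) table and indexes a family array at the end.
import Mathlib
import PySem

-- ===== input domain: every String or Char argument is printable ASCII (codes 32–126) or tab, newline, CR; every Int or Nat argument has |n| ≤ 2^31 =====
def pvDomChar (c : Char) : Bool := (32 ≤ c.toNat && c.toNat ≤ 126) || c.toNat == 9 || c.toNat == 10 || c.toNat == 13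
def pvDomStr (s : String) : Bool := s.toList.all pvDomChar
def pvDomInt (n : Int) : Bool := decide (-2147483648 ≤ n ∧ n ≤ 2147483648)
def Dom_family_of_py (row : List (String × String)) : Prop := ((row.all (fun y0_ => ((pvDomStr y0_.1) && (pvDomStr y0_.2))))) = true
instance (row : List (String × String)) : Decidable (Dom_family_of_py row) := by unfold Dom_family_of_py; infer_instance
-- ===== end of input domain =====

-- B replaces the keyword-cascade with a single position scan keeping a minimum-priority accumulator (alternative; same cost).

-- ===== PORT A =====
def family_of_py (row : List (String × String)) : String :=
  let rt := PySem.Str.strip (((PySem.Dict.ofList row).get? "ReactionType").getD "")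
  if rt = "" then "Other"
  else
    let low := PySem.Str.lower rt
    if PySem.Str.isIn "ullmann" low then "Ullmann"
    else if PySem.Str.isIn "amide" low || PySem.Str.isIn "amidation" low then "Amide Formation"
    else if ["buchwald", "suzuki", "heck", "sonogashira", "stille", "negishi",
             "chan-lam", "cross-coupling"].any (fun x => PySem.Str.isIn x low) then "Cross-Coupling"
    else "Other"

-- ===== PORT B =====
-- _KEYWORDS: flat (keyword, priority) table; priority = index into _FAMILIES
def pvKeywords : List (List Char × Nat) :=
  [("ullmann".toList, 0), ("amide".toList, 1), ("amidation".toList, 1),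
   ("buchwald".toList, 2), ("suzuki".toList, 2), ("heck".toList, 2), ("sonogashira".toList, 2),
   ("stille".toList, 2), ("negishi".toList, 2), ("chan-lam".toList, 2), ("cross-coupling".toList, 2)]

def pvFamilies : List String := ["Ullmann", "Amide Formation", "Cross-Coupling", "Other"]

def family_of_py_alt (row : List (String × String)) : String :=
  let rt := PySem.Str.strip (((PySem.Dict.ofList row).get? "ReactionType").getD "")
  if rt = "" then "Other"
  else
    let low := (PySem.Str.lower rt).toList
    -- for i in range(len(low)): for kw, pri in _KEYWORDS: if pri < best and low.startswith(kw, i): best = pri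
    -- low.startswith(kw, i) ported as Chars.startswith on (low.drop i): exact since i from range(len(low)) is 0 ≤ i < len
    let best := (PySem.List.pyRange 0 low.length 1).foldl
      (fun b i => pvKeywords.foldl
        (fun b p => if decide (p.2 < b) && PySem.Chars.startswith (low.drop i.toNat) p.1 then p.2 else b) b) 3
    pvFamilies.getD best "Other"  -- _FAMILIES[best]; best is always in range (0..3)

-- ===== PRECONDITION & SPEC =====
def Spec_family_of_py (row : List (String × String)) (out : String) : Prop := out = family_of_py_alt row
instance (row : List (String × String)) (out : String) : Decidable (Spec_family_of_py row out) := by unfold Spec_family_of_py; infer_instance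

-- ===== CLAIM (what is proved, stated in full; the proofs are below) =====
def Claim_equal_family_of_py : Prop := ∀ (row : List (String × String)), Dom_family_of_py row → Spec_family_of_py row (family_of_py row)

-- ===== LEMMAS AND PROOFS =====

-- inner fold (one position): ≤ k iff the accumulator already is, or some keyword of priority ≤ k starts here
theorem pv_inner_le (tbl : List (List Char × Nat)) (s : List Char) :
    ∀ (b k : Nat),
      (tbl.foldl (fun b p => if decide (p.2 < b) && PySem.Chars.startswith s p.1 then p.2 else b) b) ≤ k
      ↔ b ≤ k ∨ ∃ p ∈ tbl, PySem.Chars.startswith s p.1 = true ∧ p.2 ≤ k := by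
  induction tbl with
  | nil => intro b k; simp
  | cons hd tl ih =>
      intro b k
      rw [List.foldl_cons]
      have hstep : (if (decide (hd.2 < b) && PySem.Chars.startswith s hd.1) = true then hd.2 else b)
          = if PySem.Chars.startswith s hd.1 = true then min b hd.2 else b := by
        by_cases hsw : PySem.Chars.startswith s hd.1 = true <;>
          by_cases h2 : hd.2 < b <;> simp [hsw, h2] <;> omega
      rw [hstep]
      by_cases hsw : PySem.Chars.startswith s hd.1 = true
      · rw [if_pos hsw, ih]
        constructor
        · rintro (h | ⟨p, hp, h1, h2⟩)
          · by_cases hb : b ≤ k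
            · exact Or.inl hb
            · exact Or.inr ⟨hd, List.mem_cons_self, hsw, by omega⟩
          · exact Or.inr ⟨p, List.mem_cons_of_mem _ hp, h1, h2⟩
        · rintro (h | ⟨p, hp, h1, h2⟩)
          · exact Or.inl (by omega)
          · rcases List.mem_cons.mp hp with rfl | hp'
            · exact Or.inl (by omega)
            · exact Or.inr ⟨p, hp', h1, h2⟩
      · rw [if_neg hsw, ih]
        constructor
        · rintro (h | ⟨p, hp, h1, h2⟩)
          · exact Or.inl h
          · exact Or.inr ⟨p, List.mem_cons_of_mem _ hp, h1, h2⟩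
        · rintro (h | ⟨p, hp, h1, h2⟩)
          · exact Or.inl h
          · rcases List.mem_cons.mp hp with rfl | hp'
            · exact absurd h1 hsw
            · exact Or.inr ⟨p, hp', h1, h2⟩

-- outer fold over the first n positions
theorem pv_outer_le (low : List Char) :
    ∀ (n : Nat) (b k : Nat),
      ((List.range n).foldl
        (fun b i => pvKeywords.foldl
          (fun b p => if decide (p.2 < b) && PySem.Chars.startswith (low.drop i) p.1 then p.2 else b) b) b) ≤ k
      ↔ b ≤ k ∨ ∃ i < n, ∃ p ∈ pvKeywords, PySem.Chars.startswith (low.drop i) p.1 = true ∧ p.2 ≤ k := by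
  intro n
  induction n with
  | zero => intro b k; simp
  | succ n ih =>
      intro b k
      rw [List.range_succ, List.foldl_append]
      simp only [List.foldl_cons, List.foldl_nil]
      rw [pv_inner_le, ih]
      constructor
      · rintro ((h | ⟨i, hi, hp⟩) | ⟨p, hp, h1, h2⟩)
        · exact Or.inl h
        · exact Or.inr ⟨i, Nat.lt_succ_of_lt hi, hp⟩
        · exact Or.inr ⟨n, Nat.lt_succ_self n, p, hp, h1, h2⟩
      · rintro (h | ⟨i, hi, hp⟩)
        · exact Or.inl (Or.inl h)
        · rcases Nat.lt_succ_iff_lt_or_eq.mp hi with hi' | rfl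
          · exact Or.inl (Or.inr ⟨i, hi', hp⟩)
          · exact Or.inr hp

-- a nonempty keyword starts at some position < length iff it is an infix
theorem pv_pos_iff_isIn (kw low : List Char) (hkw : kw ≠ []) :
    (∃ i < low.length, PySem.Chars.startswith (low.drop i) kw = true)
    ↔ PySem.Chars.isIn kw low = true := by
  rw [← PySem.Chars.exists_prefix_drop_iff_isIn]
  constructor
  · rintro ⟨i, _, h⟩
    exact ⟨i, (PySem.Chars.startswith_iff _ _).mp h⟩
  · rintro ⟨j, h⟩
    by_cases hj : j < low.length
    · exact ⟨j, hj, (PySem.Chars.startswith_iff _ _).mpr h⟩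
    · exfalso
      rw [List.drop_eq_nil_of_le (by omega)] at h
      exact hkw (List.prefix_nil.mp h)

-- pyRange 0 n 1 fold is the List.range fold
theorem pv_pyRange_fold (low : List Char) (b : Nat) :
    ((PySem.List.pyRange 0 (low.length : Int) 1).foldl
      (fun b i => pvKeywords.foldl
        (fun b p => if decide (p.2 < b) && PySem.Chars.startswith (low.drop i.toNat) p.1 then p.2 else b) b) b)
    = ((List.range low.length).foldl
      (fun b i => pvKeywords.foldl
        (fun b p => if decide (p.2 < b) && PySem.Chars.startswith (low.drop i) p.1 then p.2 else b) b) b) := by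
  rw [PySem.List.pyRange_zero_natCast, List.foldl_map]
  simp

-- every keyword in the table is nonempty
theorem pv_kw_ne : ∀ p ∈ pvKeywords, p.1 ≠ [] := by decide

-- best ≤ k iff some keyword of priority ≤ k occurs in low (or 3 ≤ k)
theorem pv_best_le (L : List Char) (k : Nat) :
    ((List.range L.length).foldl
      (fun b i => pvKeywords.foldl
        (fun b p => if decide (p.2 < b) && PySem.Chars.startswith (L.drop i) p.1 then p.2 else b) b) 3) ≤ k
    ↔ 3 ≤ k ∨ ∃ p ∈ pvKeywords, p.2 ≤ k ∧ PySem.Chars.isIn p.1 L = true := by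
  rw [pv_outer_le]
  constructor
  · rintro (h3 | ⟨i, hi, p, hp, hsw, hpk⟩)
    · exact Or.inl h3
    · exact Or.inr ⟨p, hp, hpk, (pv_pos_iff_isIn p.1 L (pv_kw_ne p hp)).mp ⟨i, hi, hsw⟩⟩
  · rintro (h3 | ⟨p, hp, hpk, hin⟩)
    · exact Or.inl h3
    · obtain ⟨i, hi, hsw⟩ := (pv_pos_iff_isIn p.1 L (pv_kw_ne p hp)).mpr hin
      exact Or.inr ⟨i, hi, p, hp, hsw, hpk⟩

-- the core: the scan's best index selects exactly A's cascade branch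
theorem pv_main (low : String) :
    (pvFamilies.getD
      ((PySem.List.pyRange 0 ((low.toList.length : Nat) : Int) 1).foldl
        (fun b i => pvKeywords.foldl
          (fun b p => if decide (p.2 < b) && PySem.Chars.startswith (low.toList.drop i.toNat) p.1 then p.2 else b) b) 3)
      "Other")
    = (if PySem.Str.isIn "ullmann" low then "Ullmann"
       else if PySem.Str.isIn "amide" low || PySem.Str.isIn "amidation" low then "Amide Formation"
       else if ["buchwald", "suzuki", "heck", "sonogashira", "stille", "negishi",
                "chan-lam", "cross-coupling"].any (fun x => PySem.Str.isIn x low) then "Cross-Coupling"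
       else "Other") := by
  rw [pv_pyRange_fold low.toList 3]
  have h0 := pv_best_le low.toList 0
  have h1 := pv_best_le low.toList 1
  have h2 := pv_best_le low.toList 2
  have h3 := (pv_best_le low.toList 3).mpr (Or.inl le_rfl)
  simp only [pvKeywords, List.mem_cons, List.not_mem_nil, or_false, exists_eq_or_imp,
    exists_eq_left, Nat.le_refl, Nat.zero_le, true_and, false_and, false_or, or_false,
    Nat.reduceLeDiff] at h0 h1 h2 h3
  simp only [PySem.Str.isIn_eq, List.any_cons, List.any_nil, Bool.or_false, pvKeywords]
  by_cases hu : PySem.Chars.isIn "ullmann".toList low.toList = true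
  · have hb : _ = 0 := Nat.le_zero.mp (h0.mpr hu)
    rw [hb, if_pos hu]
    rfl
  · by_cases ha : (PySem.Chars.isIn "amide".toList low.toList || PySem.Chars.isIn "amidation".toList low.toList) = true
    · have ha' := ha
      simp only [Bool.or_eq_true] at ha'
      have hle := h1.mpr (Or.inr ha')
      have hgt := mt h0.mp hu
      have hb := Nat.le_antisymm hle (Nat.not_le.mp hgt)
      rw [hb, if_neg hu, if_pos ha]
      rfl
    · by_cases hc : (PySem.Chars.isIn "buchwald".toList low.toList || (PySem.Chars.isIn "suzuki".toList low.toList ||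
          (PySem.Chars.isIn "heck".toList low.toList || (PySem.Chars.isIn "sonogashira".toList low.toList ||
          (PySem.Chars.isIn "stille".toList low.toList || (PySem.Chars.isIn "negishi".toList low.toList ||
          (PySem.Chars.isIn "chan-lam".toList low.toList || PySem.Chars.isIn "cross-coupling".toList low.toList))))))) = true
      · have hc' := hc
        simp only [Bool.or_eq_true] at hc'
        have hle := h2.mpr (Or.inr (Or.inr (Or.inr hc')))
        have hgt := mt h1.mp (fun hd => by
          rcases hd with h | h | h
          · exact hu h
          · exact ha (by rw [Bool.or_eq_true]; exact Or.inl h)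
          · exact ha (by rw [Bool.or_eq_true]; exact Or.inr h))
        have hb := Nat.le_antisymm hle (Nat.not_le.mp hgt)
        rw [hb, if_neg hu, if_neg ha, if_pos hc]
        rfl
      · have hgt := mt h2.mp (fun hd => by
          rcases hd with h | h | h | h | h | h | h | h | h | h | h
          · exact hu h
          · exact ha (by rw [Bool.or_eq_true]; exact Or.inl h)
          · exact ha (by rw [Bool.or_eq_true]; exact Or.inr h)
          · exact hc (by simp only [Bool.or_eq_true]; exact Or.inl h)
          · exact hc (by simp only [Bool.or_eq_true]; exact Or.inr (Or.inl h))
          · exact hc (by simp only [Bool.or_eq_true]; exact Or.inr (Or.inr (Or.inl h)))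
          · exact hc (by simp only [Bool.or_eq_true]; exact Or.inr (Or.inr (Or.inr (Or.inl h))))
          · exact hc (by simp only [Bool.or_eq_true]; exact Or.inr (Or.inr (Or.inr (Or.inr (Or.inl h)))))
          · exact hc (by simp only [Bool.or_eq_true]; exact Or.inr (Or.inr (Or.inr (Or.inr (Or.inr (Or.inl h))))))
          · exact hc (by simp only [Bool.or_eq_true]; exact Or.inr (Or.inr (Or.inr (Or.inr (Or.inr (Or.inr (Or.inl h)))))))
          · exact hc (by simp only [Bool.or_eq_true]; exact Or.inr (Or.inr (Or.inr (Or.inr (Or.inr (Or.inr (Or.inr h))))))))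
        have hb := Nat.le_antisymm h3 (Nat.not_le.mp hgt)
        rw [hb, if_neg hu, if_neg ha, if_neg hc]
        rfl

-- ===== VERDICT (by name: the statement is the Claim_ definition above) =====
theorem family_of_py_spec : Claim_equal_family_of_py := by
  intro row _
  unfold Spec_family_of_py family_of_py family_of_py_alt
  by_cases h : PySem.Str.strip (((PySem.Dict.ofList row).get? "ReactionType").getD "") = ""
  · simp [h]
  · simp only [h, if_false]
    exact (pv_main (PySem.Str.lower (PySem.Str.strip (((PySem.Dict.ofList row).get? "ReactionType").getD "")))).symm
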